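-- pv_equiv track=rewrite | github.com/roloffsimon/havoc | backend/app/stanza_de.py | _one_noun
-- ===== SOURCE A (Python) =====
-- DICKINSON_NOUN = [
--     [
--         ('eine', 'Luft'), ('eine', 'Kunst'), ('eine', 'Sorg'),
--         ('eine', 'Tür'), ('ein', 'Staub'), (None, 'je'),
--         ('ein', 'Ohr'), ('eine', 'Erd'), (None, 'hell'),
--         ('ein', 'Glaub'), ('eine', 'Furcht'), ('ein', 'Freund'),
--         ('ein', 'Gold'), ('eine', 'Huld'), ('ein', 'Gras'),
--         ('ein', 'Grab'), ('eine', 'Hand'), ('eine', 'Höh'),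
--         ('ein', 'Haus'), ('eine', 'Freud'), ('ein', 'Hut'),
--         ('ein', 'Bein'), ('eine', 'Macht'), ('ein', 'Sinn'),
--         ('eine', 'Früh'), ('ein', 'Nam'), ('eine', 'Not'),
--         ('ein', 'Mittag'), ('eine', 'Pein'), ('ein', 'Ort'),
--         ('ein', 'Spiel'), ('eine', 'Ruh'), ('eine', 'Ros'),
--         ('eine', 'Schau'), ('ein', 'Blick'), ('ein', 'Blau'),
--         ('ein', 'Schnee'), ('ein', 'Stern'), ('ein', 'Gedanke'),
--         ('ein', 'Baum'), ('ein', 'Quell'), ('ein', 'Wind'),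
--         ('eine', 'Welt'), ('ein', 'Jahr'),
--     ],
--     ['wieder', 'allein', 'besser', 'jenseits', 'Wonne', 'Sterben',
--      'leichthin', 'genug', 'immer', 'Vater', 'Blume', 'ferner',
--      'er selbst', 'menschlich', 'Morgen', 'ich selbst', 'Gewalt',
--      'purpurn', 'einzig', 'Geist', 'heute'],
--     ['ein andres', 'Paradies'],
--     ['Ewigkeit'],
--     ['Unsterblichkeit'],
-- ]
--
-- def _render_noun(entry):
--     art, word = entry
--     return word if art is None else f'{art} {word}'
--
-- def _one_noun(n):
--     L = len(DICKINSON_NOUN[0])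
--     d = n % L; n //= L
--     c = n % L; n //= L
--     b = n % L; n //= L
--     a = n % L
--     entries = [DICKINSON_NOUN[0][i] for i in (a, b, c, d)]
--     # Em-Dashes zwischen den Phrasen — Dickinson-Schriftbild, das die
--     # Verklumpung der vier Artikel-Wort-Paare auflöst. Sonderfall:
--     # artikellose Einträge (`je` distributiv, `hell` adjektivisch)
--     # binden sich an den folgenden Slot — der Em-Dash zwischen ihnen
--     # und dem nächsten Wort wird durch ein einfaches Leerzeichen
--     # ersetzt, sodass das Wort als Quantor bzw. Attribut zur nächsten
--     # Nomenphrase läuft (*je ein Mittag*, *hell ein Stern*). Steht ein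
--     # artikelloser Eintrag im letzten Slot, fehlt ein nächster zum
--     # Binden; er bleibt dann allein am Zeilenende stehen.
--     parts: list[str] = []
--     for i, entry in enumerate(entries):
--         if i > 0:
--             prev_artikel = entries[i - 1][0]
--             parts.append(' ' if prev_artikel is None else ' -- ')
--         parts.append(_render_noun(entry))
--     return ''.join(parts)
-- ===== SOURCE B (Python) =====
-- # Pre-rendered phrase table: each slot value maps straight to its finished
-- # noun phrase; _BINDS marks the two article-less slots ('je', 'hell') that
-- # bind onto the following phrase with a plain space instead of an em-dash.
-- _PHRASE = ['eine Luft', 'eine Kunst', 'eine Sorg', 'eine Tür', 'ein Staub',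
--            'je', 'ein Ohr', 'eine Erd', 'hell', 'ein Glaub', 'eine Furcht',
--            'ein Freund', 'ein Gold', 'eine Huld', 'ein Gras', 'ein Grab',
--            'eine Hand', 'eine Höh', 'ein Haus', 'eine Freud', 'ein Hut',
--            'ein Bein', 'eine Macht', 'ein Sinn', 'eine Früh', 'ein Nam',
--            'eine Not', 'ein Mittag', 'eine Pein', 'ein Ort', 'ein Spiel',
--            'eine Ruh', 'eine Ros', 'eine Schau', 'ein Blick', 'ein Blau',
--            'ein Schnee', 'ein Stern', 'ein Gedanke', 'ein Baum', 'ein Quell',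
--            'ein Wind', 'eine Welt', 'ein Jahr']
-- _BINDS = {5, 8}
--
--
-- def _one_noun(n):
--     # Extract the four base-44 digits least-significant first, i.e. the
--     # phrase slots right-to-left.
--     idxs = []
--     for _ in range(4):
--         idxs.append(n % 44)
--         n //= 44
--     # Group right-to-left into units: a binding slot chains onto the unit
--     # that follows it in the sentence; anything else closes a unit.
--     units = []
--     unit = None
--     for i in idxs:
--         text = _PHRASE[i]
--         if unit is None:
--             unit = text
--         elif i in _BINDS:
--             unit = text + ' ' + unit
--         else:
--             units.append(unit)
--             unit = text
--     units.append(unit)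
--     return ' -- '.join(reversed(units))
-- ===== Notes on version B (the rewrite author's own statement) =====
-- stated objective: alternative
-- what changed: B replaces the (article, word) table and A's look-back separator interleaving by a pre-rendered phrase table plus a set of binding slot indices, and groups the four slots right-to-left into phrase units (binding slots chain with a space, others close a unit) joined with ' -- '.
import Mathlib
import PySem

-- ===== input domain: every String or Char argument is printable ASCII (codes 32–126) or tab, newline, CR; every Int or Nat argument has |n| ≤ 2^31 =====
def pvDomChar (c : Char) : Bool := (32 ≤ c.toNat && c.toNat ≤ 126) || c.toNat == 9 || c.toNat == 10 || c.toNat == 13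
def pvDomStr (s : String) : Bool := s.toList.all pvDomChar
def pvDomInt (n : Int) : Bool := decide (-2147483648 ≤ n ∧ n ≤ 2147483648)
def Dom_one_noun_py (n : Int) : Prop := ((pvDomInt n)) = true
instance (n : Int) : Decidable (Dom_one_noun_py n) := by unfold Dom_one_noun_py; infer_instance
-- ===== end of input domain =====

-- B swaps A's (article, word) table and look-back separator interleaving for a
-- pre-rendered phrase table plus a set of binding slot indices, grouping the four
-- slots right-to-left into units joined with ' -- '; objective: alternative, same cost.

-- ===== PORT A =====
-- DICKINSON_NOUN[0] (the only row the function reads)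
def dickinson0 : List (Option String × String) :=
  [ (some "eine", "Luft"), (some "eine", "Kunst"), (some "eine", "Sorg"),
    (some "eine", "Tür"), (some "ein", "Staub"), (none, "je"),
    (some "ein", "Ohr"), (some "eine", "Erd"), (none, "hell"),
    (some "ein", "Glaub"), (some "eine", "Furcht"), (some "ein", "Freund"),
    (some "ein", "Gold"), (some "eine", "Huld"), (some "ein", "Gras"),
    (some "ein", "Grab"), (some "eine", "Hand"), (some "eine", "Höh"),
    (some "ein", "Haus"), (some "eine", "Freud"), (some "ein", "Hut"),
    (some "ein", "Bein"), (some "eine", "Macht"), (some "ein", "Sinn"),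
    (some "eine", "Früh"), (some "ein", "Nam"), (some "eine", "Not"),
    (some "ein", "Mittag"), (some "eine", "Pein"), (some "ein", "Ort"),
    (some "ein", "Spiel"), (some "eine", "Ruh"), (some "eine", "Ros"),
    (some "eine", "Schau"), (some "ein", "Blick"), (some "ein", "Blau"),
    (some "ein", "Schnee"), (some "ein", "Stern"), (some "ein", "Gedanke"),
    (some "ein", "Baum"), (some "ein", "Quell"), (some "ein", "Wind"),
    (some "eine", "Welt"), (some "ein", "Jahr") ]

-- _render_noun
def renderNoun (entry : Option String × String) : String :=
  match entry.1 with
  | none => entry.2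
  | some art => art ++ " " ++ entry.2   -- f'{art} {word}'

-- A's digit extraction: d = n%L; n//=L; c = n%L; n//=L; b = n%L; n//=L; a = n%L,
-- then entries = [DICKINSON_NOUN[0][i] for i in (a, b, c, d)]
def nounEntries (n : Int) : List (Option String × String) :=
  let L : Int := (dickinson0.length : Int)
  let d := PySem.Int.mod n L
  let n := PySem.Int.floordiv n L
  let c := PySem.Int.mod n L
  let n := PySem.Int.floordiv n L
  let b := PySem.Int.mod n L
  let _n := PySem.Int.floordiv n L
  let a := PySem.Int.mod _n L
  ([a, b, c, d]).map (fun i => PySem.List.pyGetD dickinson0 i (none, ""))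

-- A's loop: for i, entry in enumerate(entries): append separator (by prev article), append rendered
def aJoin (entries : List (Option String × String)) : String :=
  let parts := (PySem.List.enumerate entries 0).foldl (fun parts p =>
      let parts := if p.1 > 0 then
          parts ++ [if (PySem.List.pyGetD entries (p.1 - 1) (none, "")).1 = none then " " else " -- "]
        else parts
      parts ++ [renderNoun p.2]) []
  PySem.Str.join "" parts

def one_noun_py (n : Int) : String :=
  aJoin (nounEntries n)

-- ===== PORT B =====
-- _PHRASE: the pre-rendered phrase table from Source B
def phraseB : List String :=
  ["eine Luft", "eine Kunst", "eine Sorg", "eine Tür", "ein Staub", "je",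
   "ein Ohr", "eine Erd", "hell", "ein Glaub", "eine Furcht", "ein Freund",
   "ein Gold", "eine Huld", "ein Gras", "ein Grab", "eine Hand", "eine Höh",
   "ein Haus", "eine Freud", "ein Hut", "ein Bein", "eine Macht", "ein Sinn",
   "eine Früh", "ein Nam", "eine Not", "ein Mittag", "eine Pein", "ein Ort",
   "ein Spiel", "eine Ruh", "eine Ros", "eine Schau", "ein Blick", "ein Blau",
   "ein Schnee", "ein Stern", "ein Gedanke", "ein Baum", "ein Quell",
   "ein Wind", "eine Welt", "ein Jahr"]

-- _BINDS = {5, 8}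
def bindsB : List Int := [5, 8]

-- first loop of Source B: the four base-44 digits, least significant first
def bIdxs (n : Int) : List Int :=
  ((PySem.List.pyRange 0 4 1).foldl (fun (st : List Int × Int) _ =>
      (st.1 ++ [PySem.Int.mod st.2 44], PySem.Int.floordiv st.2 44)) ([], n)).1

-- second loop of Source B: group the right-to-left slots into units, join with ' -- '
def bGroup (idxs : List Int) : String :=
  let st := idxs.foldl (fun (st : List String × Option String) i =>
      let text := PySem.List.pyGetD phraseB i ""
      match st.2 with
      | none => (st.1, some text)
      | some u =>
        if bindsB.contains i then (st.1, some (text ++ " " ++ u))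
        else (st.1 ++ [u], some text)) ([], none)
  PySem.Str.join " -- " (st.1 ++ [st.2.getD ""]).reverse

def one_noun_py_alt (n : Int) : String :=
  bGroup (bIdxs n)

-- ===== PRECONDITION & SPEC =====
def Spec_one_noun_py (n : Int) (out : String) : Prop := out = one_noun_py_alt n
instance (n : Int) (out : String) : Decidable (Spec_one_noun_py n out) := by unfold Spec_one_noun_py; infer_instance

-- ===== CLAIM (what is proved, stated in full; the proofs are below) =====
def Claim_equal_one_noun_py : Prop := ∀ (n : Int), Dom_one_noun_py n → Spec_one_noun_py n (one_noun_py n)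

-- ===== LEMMAS AND PROOFS =====

-- per-slot correspondence between the two tables
lemma idx_facts (j : Int) (h0 : 0 ≤ j) (h1 : j < 44) :
    renderNoun (PySem.List.pyGetD dickinson0 j (none, "")) = PySem.List.pyGetD phraseB j ""
    ∧ ((PySem.List.pyGetD dickinson0 j (none, "")).1 = none ↔ bindsB.contains j = true) := by
  interval_cases j <;> exact ⟨by decide, by decide⟩

lemma mod_bounds (n : Int) : 0 ≤ PySem.Int.mod n 44 ∧ PySem.Int.mod n 44 < 44 := by
  rw [PySem.Int.mod_eq_emod_of_pos (a := n) (by omega)]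
  exact ⟨Int.emod_nonneg n (by omega), Int.emod_lt_of_pos n (by omega)⟩

-- the two loop shapes agree on any four slots, abstracted from the tables:
-- ek are A's entries (sentence order e3 e2 e1 e0 = a b c d), jk B's indices
-- (right-to-left), tk the common rendered texts, ck the binding flags
lemma coreGen (e3 e2 e1 e0 : Option String × String) (j0 j1 j2 j3 : Int)
    (t0 t1 t2 t3 : String) (c1 c2 c3 : Bool)
    (r0 : renderNoun e0 = t0) (r1 : renderNoun e1 = t1)
    (r2 : renderNoun e2 = t2) (r3 : renderNoun e3 = t3)
    (p0 : PySem.List.pyGetD phraseB j0 "" = t0) (p1 : PySem.List.pyGetD phraseB j1 "" = t1)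
    (p2 : PySem.List.pyGetD phraseB j2 "" = t2) (p3 : PySem.List.pyGetD phraseB j3 "" = t3)
    (h1 : (j1 ∈ bindsB) = (c1 = true)) (h2 : (j2 ∈ bindsB) = (c2 = true))
    (h3 : (j3 ∈ bindsB) = (c3 = true))
    (a1 : (e1.1 = none) ↔ c1 = true) (a2 : (e2.1 = none) ↔ c2 = true)
    (a3 : (e3.1 = none) ↔ c3 = true) :
    aJoin [e3, e2, e1, e0] = bGroup [j0, j1, j2, j3] := by
  cases c1 <;> cases c2 <;> cases c3 <;>
    simp [aJoin, bGroup, PySem.List.enumerate, r0, r1, r2, r3, p0, p1, p2, p3,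
          h1, h2, h3, a1, a2, a3, PySem.List.pyGetD_ofNat',
          PySem.Str.join, PySem.Chars.join, List.intercalate, List.append_assoc]

-- ===== VERDICT (by name: the statement is the Claim_ definition above) =====
theorem one_noun_py_spec : Claim_equal_one_noun_py := by
  intro n _
  unfold Spec_one_noun_py one_noun_py one_noun_py_alt
  have hL : (dickinson0.length : Int) = 44 := by decide
  have hIdx : bIdxs n = [PySem.Int.mod n 44,
      PySem.Int.mod (PySem.Int.floordiv n 44) 44,
      PySem.Int.mod (PySem.Int.floordiv (PySem.Int.floordiv n 44) 44) 44,
      PySem.Int.mod (PySem.Int.floordiv (PySem.Int.floordiv (PySem.Int.floordiv n 44) 44) 44) 44] := by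
    simp [bIdxs, PySem.List.pyRange, List.range_succ]
  set j0 := PySem.Int.mod n 44 with hj0
  set j1 := PySem.Int.mod (PySem.Int.floordiv n 44) 44 with hj1
  set j2 := PySem.Int.mod (PySem.Int.floordiv (PySem.Int.floordiv n 44) 44) 44 with hj2
  set j3 := PySem.Int.mod (PySem.Int.floordiv (PySem.Int.floordiv (PySem.Int.floordiv n 44) 44) 44) 44 with hj3
  have hEnt : nounEntries n = [PySem.List.pyGetD dickinson0 j3 (none, ""),
      PySem.List.pyGetD dickinson0 j2 (none, ""), PySem.List.pyGetD dickinson0 j1 (none, ""),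
      PySem.List.pyGetD dickinson0 j0 (none, "")] := by
    simp [nounEntries, hL, hj0, hj1, hj2, hj3]
  rw [hEnt, hIdx]
  obtain ⟨f0, g0⟩ := idx_facts j0 (mod_bounds n).1 (mod_bounds n).2
  obtain ⟨f1, g1⟩ := idx_facts j1 (mod_bounds _).1 (mod_bounds _).2
  obtain ⟨f2, g2⟩ := idx_facts j2 (mod_bounds _).1 (mod_bounds _).2
  obtain ⟨f3, g3⟩ := idx_facts j3 (mod_bounds _).1 (mod_bounds _).2
  exact coreGen _ _ _ _ j0 j1 j2 j3 _ _ _ _ (decide (j1 ∈ bindsB)) (decide (j2 ∈ bindsB))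
    (decide (j3 ∈ bindsB)) f0 f1 f2 f3 rfl rfl rfl rfl (by simp) (by simp) (by simp)
    (by rw [g1]; simp) (by rw [g2]; simp) (by rw [g3]; simp)
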